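-- pv_equiv track=rewrite | github.com/cesarga-m/Showcase-Portfolio | Coding/Python/CS 303E/WordleAssistant.py | containsNone
-- ===== SOURCE A (Python) =====
-- def containsNone(wordlist, exclude):
--     """ Given your wordlist, return a set of all words from the wordlist
--     that do not contain any of the letters in the string exclude.
--     """
--     exlist = []
--     rlist = []
--     i = 0
--     count = 0
--
--     for j in exclude:   # goes through the string exclude and makes each letter an element in exlist
--         exlist.append(j)
--
--     for j in wordlist:  # goes through the words of wordlist and the goes through the letters in exlist, if the letter
--         for i in exlist:    # is in the word the count increases by 1, when the second loop ends it compares the count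
--             if i not in j: # to the length of exlist, if it's the same the word is appended, regardless the count resets
--                 count = count + 1
--         if count == len(exlist):
--             rlist.append(j)
--         count = 0
--
--     exset = set(rlist)  # makes the rlist a set, and returns this respective set
--     return exset
-- ===== SOURCE B (Python) =====
-- def containsNone(wordlist, exclude):
--     """ Given your wordlist, return a set of all words from the wordlist
--     that do not contain any of the letters in the string exclude.
--     """
--     # Inverted index: letter -> set of words containing that letter.
--     idx = {}
--     for w in wordlist:
--         for c in w:
--             idx.setdefault(c, set()).add(w)
--     # Words containing at least one excluded letter.
--     dropped = set()
--     for c in exclude: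
--         dropped |= idx.get(c, set())
--     return set(wordlist) - dropped
-- ===== Notes on version B (the rewrite author's own statement) =====
-- stated objective: faster
-- what changed: B builds an inverted index from letters to the set of words containing them, unions the index entries of the excluded letters into a 'dropped' set and returns set(wordlist) minus it, instead of A's nested loop that, for each word, scans the whole word once per excluded letter and counts avoided letters.
import Mathlib
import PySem

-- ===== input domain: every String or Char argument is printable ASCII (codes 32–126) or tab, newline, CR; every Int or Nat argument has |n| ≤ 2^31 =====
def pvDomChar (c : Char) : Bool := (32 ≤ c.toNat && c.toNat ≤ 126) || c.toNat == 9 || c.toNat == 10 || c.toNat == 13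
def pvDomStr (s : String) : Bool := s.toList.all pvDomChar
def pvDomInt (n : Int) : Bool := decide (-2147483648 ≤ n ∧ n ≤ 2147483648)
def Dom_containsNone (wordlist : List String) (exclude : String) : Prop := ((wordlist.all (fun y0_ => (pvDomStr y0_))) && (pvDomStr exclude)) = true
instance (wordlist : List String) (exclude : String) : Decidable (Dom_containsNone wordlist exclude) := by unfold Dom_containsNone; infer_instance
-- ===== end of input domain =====

-- B replaces A's per-word scan over the excluded letters by an inverted index
-- letter -> set of words, a union of the excluded letters' entries and a set difference.

-- ===== PORT A =====
-- 'i not in j' with i a single character of exclude: substring test = char membership, exact.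
def containsNone (wordlist : List String) (exclude : String) : List String :=
  let exlist : List Char := exclude.toList.foldl (fun acc j => acc ++ [j]) []
  let st := wordlist.foldl (fun (p : List String × Int) j =>
      let count := exlist.foldl (fun c i => if (j.toList.contains i) = false then c + 1 else c) p.2
      let rlist := if count = (exlist.length : Int) then p.1 ++ [j] else p.1
      (rlist, 0)) ([], 0)
  PySem.Set.ofList st.1

-- ===== PORT B =====
def containsNone_alt (wordlist : List String) (exclude : String) : List String :=
  let idx : PySem.Dict Char (PySem.Set String) :=
    wordlist.foldl (fun d w =>
      w.toList.foldl (fun d c => d.modify c PySem.Set.empty (fun s => PySem.Set.add s w)) d)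
      PySem.Dict.empty
  let dropped : PySem.Set String :=
    exclude.toList.foldl (fun s c => PySem.Set.union s (idx.getD c PySem.Set.empty)) PySem.Set.empty
  PySem.Set.diff (PySem.Set.ofList wordlist) dropped

-- ===== PRECONDITION & SPEC =====
def Spec_containsNone (wordlist : List String) (exclude : String) (out : List String) : Prop := out = containsNone_alt wordlist exclude
instance (wordlist : List String) (exclude : String) (out : List String) : Decidable (Spec_containsNone wordlist exclude out) := by unfold Spec_containsNone; infer_instance

-- ===== CLAIM (what is proved, stated in full; the proofs are below) =====
def Claim_equal_containsNone : Prop := ∀ (wordlist : List String) (exclude : String), Dom_containsNone wordlist exclude → Spec_containsNone wordlist exclude (containsNone wordlist exclude)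

-- ===== LEMMAS AND PROOFS =====

-- A's accumulator loop builds exactly the filter of wordlist by "avoids every excluded letter".
theorem aFold_eq_filter (ex : List Char) (l : List String) (acc : List String) :
    l.foldl (fun (p : List String × Int) j =>
      let count := ex.foldl (fun c i => if (j.toList.contains i) = false then c + 1 else c) p.2
      let rlist := if count = (ex.length : Int) then p.1 ++ [j] else p.1
      (rlist, 0)) (acc, 0)
    = (acc ++ l.filter (fun j => ex.all (fun i => !(j.toList.contains i))), 0) := by
  induction l generalizing acc with
  | nil => simp
  | cons j t ih =>
    simp only [List.foldl_cons, List.filter_cons]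
    have hcnt : (ex.foldl (fun c i => if (j.toList.contains i) = false then c + 1 else c) (0 : Int)
        = (ex.length : Int)) ↔ ex.all (fun i => !(j.toList.contains i)) = true := by
      rw [PySem.List.foldl_ite_add_one (fun i => (j.toList.contains i) = false)]
      rw [zero_add, Int.natCast_inj, List.countP_eq_length, List.all_eq_true]
      simp
    by_cases h : ex.all (fun i => !(j.toList.contains i)) = true
    · rw [if_pos (hcnt.mpr h), ih, h, if_pos rfl, List.append_assoc]
      rfl
    · rw [if_neg (fun hc => h (hcnt.mp hc)), ih]
      rw [Bool.not_eq_true] at h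
      rw [h, if_neg (by simp)]

-- Adding word w to the index entries of all its letters: membership characterization.
theorem innerIdx_mem (w : String) (cs : List Char) (d : PySem.Dict Char (PySem.Set String))
    (c : Char) (w' : String) :
    w' ∈ (cs.foldl (fun d c => d.modify c PySem.Set.empty (fun s => PySem.Set.add s w)) d).getD c PySem.Set.empty
    ↔ w' ∈ d.getD c PySem.Set.empty ∨ (w' = w ∧ c ∈ cs) := by
  induction cs generalizing d with
  | nil => simp
  | cons x t ih =>
    simp only [List.foldl_cons, ih, PySem.Dict.getD_modify, List.mem_cons]
    by_cases hx : c = x <;> simp [hx, PySem.Set.mem_add]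
    tauto

-- The full inverted index: w' ∈ idx[c] iff w' is a word of the list containing the letter c.
theorem idx_mem (l : List String) (d : PySem.Dict Char (PySem.Set String)) (c : Char) (w' : String) :
    w' ∈ (l.foldl (fun d w =>
        w.toList.foldl (fun d c => d.modify c PySem.Set.empty (fun s => PySem.Set.add s w)) d) d).getD c PySem.Set.empty
    ↔ w' ∈ d.getD c PySem.Set.empty ∨ (w' ∈ l ∧ c ∈ w'.toList) := by
  induction l generalizing d with
  | nil => simp
  | cons w t ih =>
    simp only [List.foldl_cons, ih, innerIdx_mem, List.mem_cons]
    constructor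
    · rintro ((h | ⟨rfl, hc⟩) | ⟨hm, hc⟩) <;> tauto
    · rintro (h | ⟨rfl | hm, hc⟩) <;> tauto

-- The union loop over the excluded letters: membership characterization.
theorem dropped_mem (f : Char → PySem.Set String) (ex : List Char) (s : PySem.Set String) (w' : String) :
    w' ∈ ex.foldl (fun s c => PySem.Set.union s (f c)) s
    ↔ w' ∈ s ∨ ∃ c ∈ ex, w' ∈ f c := by
  induction ex generalizing s with
  | nil => simp
  | cons c t ih =>
    simp only [List.foldl_cons, ih, PySem.Set.mem_union, List.mem_cons]
    constructor
    · rintro ((h | h) | ⟨c', hc', h⟩)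
      · exact Or.inl h
      · exact Or.inr ⟨c, Or.inl rfl, h⟩
      · exact Or.inr ⟨c', Or.inr hc', h⟩
    · rintro (h | ⟨c', rfl | hc', h⟩)
      · exact Or.inl (Or.inl h)
      · exact Or.inl (Or.inr h)
      · exact Or.inr ⟨c', hc', h⟩

-- Filtering commutes with Set.add.
theorem filter_add {α : Type} [BEq α] [LawfulBEq α] (p : α → Bool) (s : PySem.Set α) (x : α) :
    (PySem.Set.add s x).filter p = if p x then PySem.Set.add (s.filter p) x else s.filter p := by
  by_cases hp : p x = true <;> by_cases hm : x ∈ s <;>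
    simp [hp, hm, List.filter_append, List.mem_filter]

-- Dedup-then-filter = filter-then-dedup (first-occurrence order), foldl form.
theorem foldl_add_filter {α : Type} [BEq α] [LawfulBEq α] (p : α → Bool) (l : List α) (s : PySem.Set α) :
    (l.filter p).foldl PySem.Set.add (s.filter p) = (l.foldl PySem.Set.add s).filter p := by
  induction l generalizing s with
  | nil => rfl
  | cons x t ih =>
    simp only [List.filter_cons, List.foldl_cons]
    by_cases hp : p x = true
    · rw [hp, if_pos rfl, List.foldl_cons, ← ih, filter_add, if_pos hp]
    · rw [Bool.not_eq_true] at hp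
      rw [hp, if_neg (by simp), ← ih, filter_add, hp, if_neg (by simp)]

theorem ofList_filter {α : Type} [BEq α] [LawfulBEq α] (p : α → Bool) (l : List α) :
    PySem.Set.ofList (l.filter p) = (PySem.Set.ofList l).filter p := by
  rw [PySem.Set.ofList_eq_foldl, PySem.Set.ofList_eq_foldl]
  exact foldl_add_filter p l []

-- ===== VERDICT (by name: the statement is the Claim_ definition above) =====
theorem containsNone_spec : Claim_equal_containsNone := by
  intro wordlist exclude _
  show containsNone wordlist exclude = containsNone_alt wordlist exclude
  simp only [containsNone, containsNone_alt]
  rw [PySem.List.foldl_append_singleton, List.nil_append, aFold_eq_filter]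
  simp only [List.nil_append]
  rw [ofList_filter]
  have hdiff : ∀ (s t : PySem.Set String),
      PySem.Set.diff s t = s.filter (fun x => !(PySem.Set.contains t x)) := fun _ _ => rfl
  rw [hdiff]
  apply List.filter_congr
  intro w hw
  have hw' : w ∈ wordlist := (PySem.Set.mem_ofList _ _).mp hw
  have hdm : PySem.Set.contains (exclude.toList.foldl (fun s c => PySem.Set.union s
        ((wordlist.foldl (fun d w =>
          w.toList.foldl (fun d c => d.modify c PySem.Set.empty (fun s => PySem.Set.add s w)) d)
          PySem.Dict.empty).getD c PySem.Set.empty)) PySem.Set.empty) w = true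
      ↔ ∃ c ∈ exclude.toList, c ∈ w.toList := by
    rw [PySem.Set.contains_iff,
      dropped_mem (fun c => (wordlist.foldl (fun d w =>
        w.toList.foldl (fun d c => d.modify c PySem.Set.empty (fun s => PySem.Set.add s w)) d)
        PySem.Dict.empty).getD c PySem.Set.empty)]
    constructor
    · rintro (h | ⟨c, hc, h⟩)
      · simp [PySem.Set.empty] at h
      · rw [idx_mem] at h
        rcases h with h | ⟨_, hcw⟩
        · rw [PySem.Dict.getD_empty] at h
          simp [PySem.Set.empty] at h
        · exact ⟨c, hc, hcw⟩
    · rintro ⟨c, hc, hcw⟩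
      exact Or.inr ⟨c, hc, (idx_mem _ _ _ _).mpr (Or.inr ⟨hw', hcw⟩)⟩
  rw [Bool.eq_iff_iff]
  simp only [List.all_eq_true, Bool.not_eq_true', ← Bool.not_eq_true, hdm]
  push Not
  constructor
  · intro h c hc
    simpa using h c hc
  · intro h c hc
    simpa using h c hc
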